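-- pv_equiv track=rewrite | github.com/lbvalcke/Classwork | lbvalcke-master-122/lbvalcke-master-a3fa9d442dc280c08a0ff3fd54751bb1bdff6871/kattis/blackfriday.py | solve
-- ===== SOURCE A (Python) =====
-- def solve(rolls):
--     """
--     Parameters:
--      - rolls: List of integers. The outcome of each participant's die roll.
--
--     Returns: Integer, or None.
--              The index of the participat that has the highest unique outcome.
--              If no such participant exists, return None.
--     """
--
--     # Your code here.
--     unique_dict = {}
--     unique_list = []
--     remove_list = []
--     for i, roll in enumerate(rolls):
--         if roll not in unique_dict:
--             if roll not in remove_list: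
--                 unique_dict[roll]  = i + 1
--                 unique_list.append(roll)
--         elif roll in unique_dict:
--             remove_list.append(roll)
--             unique_dict.pop(roll)
--             unique_list.remove(roll)
--     unique_list = sorted(unique_list)
--     if unique_list != []:
--         return unique_dict[unique_list[-1]]
--     else:
--         return None
-- ===== SOURCE B (Python) =====
-- def solve(rolls):
--     counts = {}
--     for v in rolls:
--         counts[v] = counts.get(v, 0) + 1
--     best = None
--     for i, v in enumerate(rolls):
--         if counts[v] == 1 and (best is None or v > best[0]):
--             best = (v, i + 1)
--     return None if best is None else best[1]
-- ===== Notes on version B (the rewrite author's own statement) =====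
-- stated objective: faster
-- what changed: A maintains a dict plus unique/removed lists with O(n) inner membership/remove scans and a final sort; B counts occurrences in one dict pass and then takes the best (value, index) pair among count-1 values in a single max-scan.
import Mathlib
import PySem

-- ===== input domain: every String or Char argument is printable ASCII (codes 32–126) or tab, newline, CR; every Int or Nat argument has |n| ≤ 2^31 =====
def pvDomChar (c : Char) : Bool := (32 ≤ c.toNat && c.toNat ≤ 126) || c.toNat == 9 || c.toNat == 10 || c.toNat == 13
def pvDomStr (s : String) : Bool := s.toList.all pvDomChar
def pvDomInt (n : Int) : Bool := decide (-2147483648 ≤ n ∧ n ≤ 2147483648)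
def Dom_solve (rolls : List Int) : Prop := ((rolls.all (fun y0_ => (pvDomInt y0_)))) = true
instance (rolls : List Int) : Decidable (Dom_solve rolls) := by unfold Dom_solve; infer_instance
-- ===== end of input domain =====

-- B replaces A's dict/remove-list bookkeeping and final sort by a counting pass plus a single max-scan.


-- ===== PORT A =====
-- one loop iteration of A: state = (unique_dict, unique_list, remove_list), p = (i, roll)
def solveStepA (st : PySem.Dict Int Int × List Int × List Int) (p : Int × Int) :
    PySem.Dict Int Int × List Int × List Int :=
  if st.1.contains p.2 = false then
    if p.2 ∈ st.2.2 then st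
    else (st.1.insert p.2 (p.1 + 1), st.2.1 ++ [p.2], st.2.2)
  else
    -- remove_list.append(roll); unique_dict.pop(roll); unique_list.remove(roll)
    -- (.remove never raises here: the value is in unique_list whenever it is in unique_dict,
    --  so the `.getD st.2.1` fallback is unreachable)
    (st.1.erase p.2, (PySem.List.remove? st.2.1 p.2).getD st.2.1, st.2.2 ++ [p.2])

-- unique_list = sorted(unique_list); if unique_list != []: return unique_dict[unique_list[-1]]
-- (the key is always present, so get? returns its value)
def solveFinishA (st : PySem.Dict Int Int × List Int × List Int) : Option Int :=
  if PySem.List.sorted st.2.1 (fun x => x) false ≠ [] then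
    match PySem.List.pyGet? (PySem.List.sorted st.2.1 (fun x => x) false) (-1) with
    | some m => st.1.get? m
    | none => none
  else none

def solve (rolls : List Int) : Option Int :=
  solveFinishA ((PySem.List.enumerate rolls 0).foldl solveStepA (PySem.Dict.empty, [], []))

-- ===== PORT B =====
-- one iteration of B's second loop: keep the best (value, 1-based index) among unique values
def solveStepB (counts : PySem.Dict Int Int) (best : Option (Int × Int)) (p : Int × Int) :
    Option (Int × Int) :=
  if counts.getD p.2 0 == 1 && best.elim true (fun b => decide (b.1 < p.2)) then
    some (p.2, p.1 + 1)
  else best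

def solve_alt (rolls : List Int) : Option Int :=
  ((PySem.List.enumerate rolls 0).foldl
      (solveStepB (rolls.foldl (fun d v => d.insert v (d.getD v 0 + 1)) PySem.Dict.empty))
      none).map (·.2)

-- ===== PRECONDITION & SPEC =====
def Spec_solve (rolls : List Int) (out : Option Int) : Prop := out = solve_alt rolls
instance (rolls : List Int) (out : Option Int) : Decidable (Spec_solve rolls out) := by unfold Spec_solve; infer_instance

-- ===== CLAIM (what is proved, stated in full; the proofs are below) =====
def Claim_equal_solve : Prop := ∀ (rolls : List Int), Dom_solve rolls → Spec_solve rolls (solve rolls)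

-- ===== LEMMAS AND PROOFS =====

-- the common reference value: 1-based position of the largest value occurring exactly once
def uniqVals (rolls : List Int) : List Int := rolls.filter (fun v => rolls.count v == 1)

def target (rolls : List Int) : Option Int :=
  match PySem.List.max? (uniqVals rolls) (fun v => v) with
  | none => none
  | some m => some ((List.idxOf m rolls : Int) + 1)

-- get? after erase (no such lemma in the prelude)
theorem dict_get?_erase (d : PySem.Dict Int Int) (k k' : Int) :
    (d.erase k).get? k' = if k' = k then none else d.get? k' := by
  rcases d with ⟨items⟩
  induction items with
  | nil => simp [PySem.Dict.erase, PySem.Dict.get?]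
  | cons p t ih =>
      simp only [PySem.Dict.erase, PySem.Dict.get?, List.filter_cons] at *
      by_cases hk : p.1 = k <;> by_cases hk' : p.1 = k' <;>
        simp [List.find?_cons, beq_iff_eq, hk, hk', ih] <;> split_ifs with hkk <;>
        simp_all [beq_iff_eq] <;> simp [beq_eq_false_iff_ne.mpr hk']

-- last element of a ≤-pairwise list is an upper bound
theorem pairwise_le_getLast {l : List Int} (h : l.Pairwise (· ≤ ·)) (hne : l ≠ [])
    {a : Int} (ha : a ∈ l) : a ≤ l.getLast hne := by
  induction l with
  | nil => simp at ha
  | cons x t ih =>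
      rcases List.pairwise_cons.mp h with ⟨hx, ht⟩
      cases t with
      | nil =>
          have : a = x := by simpa using ha
          simp [this, List.getLast]
      | cons y u =>
          have hyu : a = x ∨ a ∈ y :: u := by simpa using ha
          have hlast : (x :: y :: u).getLast (by simp) = (y :: u).getLast (by simp) := by
            simp [List.getLast_cons]
          rcases hyu with rfl | hmem
          · rw [hlast]
            exact hx _ (List.getLast_mem (by simp))
          · rw [hlast]; exact ih ht (by simp) hmem

theorem pyGet?_neg_one (l : List Int) (h : l ≠ []) :
    PySem.List.pyGet? l (-1) = l.getLast? := by
  have hl : 1 ≤ l.length := List.length_pos_iff.mpr h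
  simp [PySem.List.pyGet?, PySem.List.pyIdx?, hl, List.getLast?_eq_getElem?]

-- ---------- A side ----------
def InvA (xs : List Int) (st : PySem.Dict Int Int × List Int × List Int) : Prop :=
  (∀ v : Int, st.1.get? v = if xs.count v = 1 then some ((List.idxOf v xs : Int) + 1) else none) ∧
  (∀ v : Int, v ∈ st.2.1 ↔ xs.count v = 1) ∧
  (∀ v : Int, v ∈ st.2.2 ↔ 2 ≤ xs.count v) ∧
  st.2.1.Nodup

theorem stepA_inv {xs : List Int} {st} (h : InvA xs st) (x : Int) :
    InvA (xs ++ [x]) (solveStepA st ((xs.length : Int), x)) := by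
  obtain ⟨d, ul, rl⟩ := st
  obtain ⟨hd, hul, hrl, hnd⟩ := h
  simp only at hd hul hrl hnd
  have hcx' : List.count x (xs ++ [x]) = xs.count x + 1 := by
    simp [List.count_append]
  have hcv : ∀ v : Int, v ≠ x → List.count v (xs ++ [x]) = List.count v xs := by
    intro v hv
    simp [List.count_append, List.count_singleton, beq_iff_eq, Ne.symm hv]
  have hidxv : ∀ v : Int, List.count v xs = 1 →
      List.idxOf v (xs ++ [x]) = List.idxOf v xs := by
    intro v hc
    have hvmem : v ∈ xs := List.count_pos_iff.mp (by omega)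
    rw [List.idxOf_append, if_pos hvmem]
  have hcontains : d.contains x = (d.get? x).isSome := PySem.Dict.contains_eq_isSome_get? d x
  by_cases hcx1 : xs.count x = 1
  · -- second occurrence: erase branch
    have hcon : d.contains x = true := by rw [hcontains, hd x, if_pos hcx1]; rfl
    have hxul : x ∈ ul := (hul x).mpr hcx1
    have hrem : (PySem.List.remove? ul x).getD ul = ul.erase x := by
      rw [PySem.List.remove?_eq_some_erase ul x hxul]; rfl
    refine ⟨?_, ?_, ?_, ?_⟩ <;>
      simp only [solveStepA, hcon, Bool.true_eq_false, if_false]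
    · intro v
      by_cases hv : v = x
      · subst hv
        rw [dict_get?_erase, if_pos rfl, if_neg (by omega)]
      · rw [dict_get?_erase, if_neg hv, hd v, hcv v hv]
        by_cases hc : xs.count v = 1
        · rw [if_pos hc, if_pos hc, hidxv v hc]
        · rw [if_neg hc, if_neg hc]
    · intro v
      simp only [hrem]
      by_cases hv : v = x
      · subst hv
        constructor
        · intro hm
          exact absurd ((List.Nodup.mem_erase_iff hnd).mp hm).1 (by simp)
        · intro hm
          rw [hcx'] at hm
          omega
      · rw [hcv v hv]
        simp [List.Nodup.mem_erase_iff hnd, hv, hul v]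
    · intro v
      simp only [List.mem_append, List.mem_singleton]
      by_cases hv : v = x
      · subst hv; rw [hcx']
        constructor
        · intro _; omega
        · intro _; right; rfl
      · rw [hcv v hv]
        simp [hv, hrl v]
    · simp only [hrem]; exact hnd.erase x
  · by_cases hcx0 : xs.count x = 0
    · -- first occurrence: insert branch
      have hcon : d.contains x = false := by
        rw [hcontains, hd x, if_neg hcx1]; rfl
      have hxnrl : ¬ x ∈ rl := by rw [hrl x]; omega
      have hxnxs : x ∉ xs := List.count_eq_zero.mp hcx0
      have hidx : List.idxOf x (xs ++ [x]) = xs.length := by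
        rw [List.idxOf_append, if_neg hxnxs, List.idxOf_cons_self]
        omega
      refine ⟨?_, ?_, ?_, ?_⟩ <;>
        simp only [solveStepA, hcon, if_pos rfl, if_neg hxnrl, if_true]
      · intro v
        by_cases hv : v = x
        · subst hv
          rw [PySem.Dict.get?_insert_self, if_pos (by omega), hidx]
        · rw [PySem.Dict.get?_insert_of_ne d _ hv, hd v, hcv v hv]
          by_cases hc : xs.count v = 1
          · rw [if_pos hc, if_pos hc, hidxv v hc]
          · rw [if_neg hc, if_neg hc]
      · intro v
        simp only [List.mem_append, List.mem_singleton]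
        by_cases hv : v = x
        · subst hv; rw [hcx']; simp; omega
        · rw [hcv v hv]
          simp [hv, hul v]
      · intro v
        by_cases hv : v = x
        · subst hv; rw [hcx']
          constructor
          · intro hm
            have := (hrl _).mp hm
            omega
          · intro hm
            omega
        · rw [hcv v hv]
          exact hrl v
      · have hxnul : x ∉ ul := by rw [hul x]; omega
        simp only [List.nodup_append, List.nodup_singleton, true_and]
        refine ⟨hnd, ?_⟩
        intro a ha b hb
        have hbx : b = x := by simpa using hb
        subst hbx
        exact fun hax => hxnul (hax ▸ ha)
    · -- third or later occurrence: no-op branch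
      have hge2 : 2 ≤ xs.count x := by omega
      have hcon : d.contains x = false := by
        rw [hcontains, hd x, if_neg hcx1]; rfl
      have hxrl : x ∈ rl := (hrl x).mpr hge2
      refine ⟨?_, ?_, ?_, ?_⟩ <;>
        simp only [solveStepA, hcon, if_pos rfl, if_pos hxrl, if_true]
      · intro v
        by_cases hv : v = x
        · subst hv
          rw [hd v, if_neg hcx1, if_neg (by omega)]
        · rw [hd v, hcv v hv]
          by_cases hc : xs.count v = 1
          · rw [if_pos hc, if_pos hc, hidxv v hc]
          · rw [if_neg hc, if_neg hc]
      · intro v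
        by_cases hv : v = x
        · subst hv; rw [hul _, hcx']
          constructor <;> intro <;> omega
        · rw [hul v, hcv v hv]
      · intro v
        by_cases hv : v = x
        · subst hv; rw [hrl _, hcx']
          constructor <;> intro <;> omega
        · rw [hrl v, hcv v hv]
      · exact hnd

theorem loopA (ys : List Int) : ∀ (xs : List Int) st, InvA xs st →
    InvA (xs ++ ys) ((PySem.List.enumerate ys (xs.length : Int)).foldl solveStepA st) := by
  induction ys with
  | nil => intro xs st h; simpa using h
  | cons y t ih =>
      intro xs st h
      rw [PySem.List.enumerate_cons, List.foldl_cons]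
      have h' := stepA_inv h y
      have hlen : ((xs.length : Int) + 1) = ((xs ++ [y]).length : Int) := by
        simp
      rw [hlen]
      have := ih (xs ++ [y]) _ h'
      simpa [List.append_assoc] using this

theorem A_eq_target (rolls : List Int) : solve rolls = target rolls := by
  have h0 : InvA [] ((PySem.Dict.empty : PySem.Dict Int Int), ([] : List Int), ([] : List Int)) := by
    refine ⟨?_, ?_, ?_, ?_⟩ <;> simp [PySem.Dict.get?_empty]
  have hInv : InvA rolls ((PySem.List.enumerate rolls 0).foldl solveStepA
      (PySem.Dict.empty, [], [])) := by
    have := loopA rolls [] _ h0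
    simpa using this
  obtain ⟨hd, hul, -, hnd⟩ := hInv
  unfold solve solveFinishA target
  cases hU : PySem.List.max? (uniqVals rolls) (fun v => v) with
  | none =>
      have hUnil : uniqVals rolls = [] := (PySem.List.max?_eq_none_iff _ _).mp hU
      have hulnil : ((PySem.List.enumerate rolls 0).foldl solveStepA
          (PySem.Dict.empty, [], [])).2.1 = [] := by
        rw [List.eq_nil_iff_forall_not_mem]
        intro v hv
        have hc1 : rolls.count v = 1 := (hul v).mp hv
        have hvr : v ∈ rolls := List.count_pos_iff.mp (by omega)
        have : v ∈ uniqVals rolls := by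
          simp [uniqVals, List.mem_filter, hvr, hc1]
        rw [hUnil] at this; simp at this
      rw [hulnil]
      have hsnil : PySem.List.sorted ([] : List Int) (fun x => x) false = [] := rfl
      simp [hsnil]
  | some m =>
      have hmU : m ∈ uniqVals rolls := PySem.List.max?_mem hU
      have hmax : ∀ y ∈ uniqVals rolls, y ≤ m := by
        have := PySem.List.max?_isMax hU
        simpa using this
      have hm1 : rolls.count m = 1 := by
        have := (List.mem_filter.mp hmU).2
        simpa using this
      have hmul : m ∈ ((PySem.List.enumerate rolls 0).foldl solveStepA
          (PySem.Dict.empty, [], [])).2.1 := (hul m).mpr hm1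
      set ul := ((PySem.List.enumerate rolls 0).foldl solveStepA
          (PySem.Dict.empty, [], [])).2.1 with hul_def
      have hsne : PySem.List.sorted ul (fun x => x) false ≠ [] := by
        rw [Ne, PySem.List.sorted_eq_nil_iff]
        intro hh; rw [hh] at hmul; simp at hmul
      rw [if_pos hsne, pyGet?_neg_one _ hsne,
        List.getLast?_eq_some_getLast hsne]
      have hg := List.getLast_mem hsne
      set g := (PySem.List.sorted ul (fun x => x) false).getLast hsne with hgdef
      have hgul : g ∈ ul := (PySem.List.mem_sorted _ _ _ _).mp hg
      have hg1 : rolls.count g = 1 := (hul g).mp hgul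
      have hgU : g ∈ uniqVals rolls := by
        have hvr : g ∈ rolls := List.count_pos_iff.mp (by omega)
        simp [uniqVals, List.mem_filter, hvr, hg1]
      have hgm : g ≤ m := hmax g hgU
      have hmg : m ≤ g := by
        have hp := PySem.List.sorted_pairwise ul (fun x : Int => x)
        have hms : m ∈ PySem.List.sorted ul (fun x => x) false :=
          (PySem.List.mem_sorted _ _ _ _).mpr hmul
        exact pairwise_le_getLast hp hsne hms
      have hgm' : g = m := le_antisymm hgm hmg
      rw [hgm']
      dsimp only
      rw [hd m, if_pos hm1]

-- ---------- B side ----------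
def InvB (rolls xs : List Int) (best : Option (Int × Int)) : Prop :=
  (best = none ∧ ∀ v ∈ xs, rolls.count v ≠ 1) ∨
  (∃ m, m ∈ xs ∧ rolls.count m = 1 ∧
    (∀ y ∈ xs, rolls.count y = 1 → y ≤ m) ∧ best = some (m, (List.idxOf m rolls : Int) + 1))

theorem stepB_inv {rolls xs rest : List Int} {x : Int} (hro : rolls = xs ++ x :: rest)
    {best : Option (Int × Int)} (h : InvB rolls xs best) (counts : PySem.Dict Int Int)
    (hc : ∀ v, counts.getD v 0 = (rolls.count v : Int)) :
    InvB rolls (xs ++ [x]) (solveStepB counts best ((xs.length : Int), x)) := by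
  by_cases hx1 : rolls.count x = 1
  · have hxnxs : x ∉ xs := by
      intro hmem
      have : 2 ≤ rolls.count x := by
        rw [hro, List.count_append, List.count_cons_self]
        have : 1 ≤ xs.count x := List.count_pos_iff.mpr hmem
        omega
      omega
    have hidx : (List.idxOf x rolls : Int) = (xs.length : Int) := by
      rw [hro, List.idxOf_append, if_neg hxnxs, List.idxOf_cons_self]
      simp
    have hcx : (counts.getD x 0 == 1) = true := by
      rw [hc x, hx1]; rfl
    rcases h with ⟨hb, hnone⟩ | ⟨m, hmxs, hm1, hmax, hb⟩
    · subst hb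
      right
      refine ⟨x, by simp, hx1, ?_, ?_⟩
      · intro y hy hy1
        rcases List.mem_append.mp hy with hy | hy
        · exact absurd hy1 (hnone y hy)
        · simp at hy; omega
      · simp [solveStepB, hcx, hidx]
    · subst hb
      have hxm : x ≠ m := by intro hh; rw [hh] at hxnxs; exact hxnxs hmxs
      by_cases hlt : m < x
      · right
        refine ⟨x, by simp, hx1, ?_, ?_⟩
        · intro y hy hy1
          rcases List.mem_append.mp hy with hy | hy
          · exact le_of_lt (lt_of_le_of_lt (hmax y hy hy1) hlt)
          · simp at hy; omega
        · simp [solveStepB, hcx, hlt, hidx]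
      · right
        refine ⟨m, List.mem_append.mpr (Or.inl hmxs), hm1, ?_, ?_⟩
        · intro y hy hy1
          rcases List.mem_append.mp hy with hy | hy
          · exact hmax y hy hy1
          · simp at hy; subst hy; omega
        · simp [solveStepB, hcx, hlt]
  · have hcx : (counts.getD x 0 == 1) = false := by
      rw [hc x]
      simp only [beq_eq_false_iff_ne, Ne]
      intro hh
      exact hx1 (by exact_mod_cast hh)
    have hstep : solveStepB counts best ((xs.length : Int), x) = best := by
      simp [solveStepB, hcx]
    rw [hstep]
    rcases h with ⟨hb, hnone⟩ | ⟨m, hmxs, hm1, hmax, hb⟩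
    · left
      refine ⟨hb, ?_⟩
      intro v hv
      rcases List.mem_append.mp hv with hv | hv
      · exact hnone v hv
      · simp at hv; subst hv; exact hx1
    · right
      refine ⟨m, List.mem_append.mpr (Or.inl hmxs), hm1, ?_, hb⟩
      intro y hy hy1
      rcases List.mem_append.mp hy with hy | hy
      · exact hmax y hy hy1
      · simp at hy; subst hy; exact absurd hy1 hx1

theorem loopB (rolls : List Int) (counts : PySem.Dict Int Int)
    (hc : ∀ v, counts.getD v 0 = (rolls.count v : Int)) (ys : List Int) :
    ∀ (xs : List Int) best, rolls = xs ++ ys → InvB rolls xs best →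
    InvB rolls (xs ++ ys) ((PySem.List.enumerate ys (xs.length : Int)).foldl
      (solveStepB counts) best) := by
  induction ys with
  | nil => intro xs best _ h; simpa using h
  | cons y t ih =>
      intro xs best hro h
      rw [PySem.List.enumerate_cons, List.foldl_cons]
      have h' := stepB_inv hro h counts hc
      have hlen : ((xs.length : Int) + 1) = ((xs ++ [y]).length : Int) := by simp
      rw [hlen]
      have hro' : rolls = (xs ++ [y]) ++ t := by rw [hro]; simp
      have := ih (xs ++ [y]) _ hro' h'
      simpa [List.append_assoc] using this

theorem B_eq_target (rolls : List Int) : solve_alt rolls = target rolls := by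
  have hc : ∀ v, (rolls.foldl (fun d v => d.insert v (d.getD v 0 + 1))
      PySem.Dict.empty).getD v 0 = (rolls.count v : Int) := by
    intro v
    have := PySem.Dict.getD_foldl_insert_add_one rolls PySem.Dict.empty v
    simpa [PySem.Dict.getD_empty] using this
  have h0 : InvB rolls [] none := Or.inl ⟨rfl, by simp⟩
  have hInv := loopB rolls _ hc rolls [] none (by simp) h0
  simp only [List.nil_append, List.length_nil, Nat.cast_zero] at hInv
  unfold solve_alt target
  rcases hInv with ⟨hb, hnone⟩ | ⟨m, hmem, hm1, hmax, hb⟩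
  · rw [hb]
    have hUnil : uniqVals rolls = [] := by
      rw [uniqVals, List.filter_eq_nil_iff]
      intro v hv
      simp only [beq_iff_eq]
      exact hnone v hv
    rw [hUnil]
    have hm0 : PySem.List.max? ([] : List Int) (fun v => v) = none :=
      (PySem.List.max?_eq_none_iff _ _).mpr rfl
    simp [hm0]
  · rw [hb]
    have hmU : m ∈ uniqVals rolls := by
      simp [uniqVals, List.mem_filter, hmem, hm1]
    cases hU : PySem.List.max? (uniqVals rolls) (fun v => v) with
    | none =>
        have := (PySem.List.max?_eq_none_iff _ _).mp hU
        rw [this] at hmU; simp at hmU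
    | some m' =>
        have hm'U : m' ∈ uniqVals rolls := PySem.List.max?_mem hU
        have hm'max : ∀ y ∈ uniqVals rolls, y ≤ m' := by
          have := PySem.List.max?_isMax hU
          simpa using this
        have hm'1 : rolls.count m' = 1 := by
          have := (List.mem_filter.mp hm'U).2
          simpa using this
        have hm'r : m' ∈ rolls := List.count_pos_iff.mp (by omega)
        have h1 : m ≤ m' := hm'max m hmU
        have h2 : m' ≤ m := hmax m' hm'r hm'1
        have : m' = m := le_antisymm h2 h1
        rw [this]
        rfl

-- ===== VERDICT (by name: the statement is the Claim_ definition above) =====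
theorem solve_spec : Claim_equal_solve := by
  intro rolls _
  unfold Spec_solve
  rw [A_eq_target, B_eq_target]
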